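-- pv_equiv track=rewrite | github.com/anandavii/python | 1_BasicProgramming/1_LogicBuildup/LCMandGCD/lcmandgcd.py | lcmAndGcd
-- ===== SOURCE A (Python) =====
-- def lcmAndGcd(A , B):
--     orgA,orgB = A, B
--     while B>0:
--         gcd = A%B
--         A = B
--         B = gcd
--     gcd = A
--     lcm = (orgA*orgB)//gcd
--     return lcm,gcd
-- ===== SOURCE B (Python) =====
-- def _stein(a, b):
--     # binary (Stein) gcd on nonnegative integers
--     if a == 0:
--         return b
--     if b == 0:
--         return a
--     if a % 2 == 0 and b % 2 == 0:
--         return 2 * _stein(a // 2, b // 2)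
--     if a % 2 == 0:
--         return _stein(a // 2, b)
--     if b % 2 == 0:
--         return _stein(a, b // 2)
--     if a >= b:
--         return _stein((a - b) // 2, b)
--     return _stein(a, (b - a) // 2)
--
-- def lcmAndGcd(A, B):
--     if B > 0:
--         g = _stein(A % B, B)
--     else:
--         g = A
--     return (A * B) // g, g
-- ===== Notes on version B (the rewrite author's own statement) =====
-- stated objective: alternative
-- what changed: The Euclidean while-loop with repeated % is replaced by a recursive binary (Stein) GCD that works by parity tests, halving and subtraction, applied after one initial A % B reduction; the LCM formula is unchanged.
import Mathlib
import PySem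

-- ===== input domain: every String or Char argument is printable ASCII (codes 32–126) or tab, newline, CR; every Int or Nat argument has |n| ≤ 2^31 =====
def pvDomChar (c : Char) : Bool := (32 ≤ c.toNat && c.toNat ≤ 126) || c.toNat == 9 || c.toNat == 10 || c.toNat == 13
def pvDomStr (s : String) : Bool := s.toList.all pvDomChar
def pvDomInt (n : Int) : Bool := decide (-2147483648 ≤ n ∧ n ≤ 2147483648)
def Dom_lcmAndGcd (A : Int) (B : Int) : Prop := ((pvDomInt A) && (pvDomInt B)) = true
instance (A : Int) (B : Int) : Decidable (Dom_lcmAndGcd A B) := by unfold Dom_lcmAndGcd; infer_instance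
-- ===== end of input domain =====

-- B replaces A's Euclidean while-loop by a recursive binary (Stein) GCD after one initial A % B reduction; same LCM formula, same cost class (alternative, not faster).

-- ===== PORT A =====
-- the while-loop of A: state (A, B), one iteration per recursive call; returns the final A (= gcd variable)
def lcmAndGcdLoopA (A : Int) (B : Int) : Int :=
  if h : B > 0 then lcmAndGcdLoopA B (PySem.Int.mod A B)
  else A
termination_by B.toNat
decreasing_by
  exact by
    have h1 := PySem.Int.mod_nonneg A h
    have h2 := PySem.Int.mod_lt A h
    omega

def lcmAndGcd (A : Int) (B : Int) : Int × Int :=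
  let gcd := lcmAndGcdLoopA A B
  let lcm := PySem.Int.floordiv (A * B) gcd
  (lcm, gcd)

-- ===== PORT B =====
-- _stein from Source B; the Nat fuel is only a totality guard (the Python recursion has none):
-- on the nonnegative arguments B passes it, fuel a.toNat + b.toNat + 1 is never exhausted (steinFuel_eq_gcd below).
def steinFuel (fuel : Nat) (a : Int) (b : Int) : Int :=
  match fuel with
  | 0 => b
  | n + 1 =>
    if a = 0 then b
    else if b = 0 then a
    else if PySem.Int.mod a 2 = 0 ∧ PySem.Int.mod b 2 = 0 then
      2 * steinFuel n (PySem.Int.floordiv a 2) (PySem.Int.floordiv b 2)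
    else if PySem.Int.mod a 2 = 0 then steinFuel n (PySem.Int.floordiv a 2) b
    else if PySem.Int.mod b 2 = 0 then steinFuel n a (PySem.Int.floordiv b 2)
    else if a ≥ b then steinFuel n (PySem.Int.floordiv (a - b) 2) b
    else steinFuel n a (PySem.Int.floordiv (b - a) 2)

def lcmAndGcd_alt (A : Int) (B : Int) : Int × Int :=
  let g :=
    if B > 0 then
      let a := PySem.Int.mod A B
      steinFuel (a.toNat + B.toNat + 1) a B
    else A
  (PySem.Int.floordiv (A * B) g, g)

-- ===== PRECONDITION & SPEC =====
-- Pre_ excludes exactly A = 0 with B ≤ 0, where the Python A (and B alike) raises ZeroDivisionError.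
def Pre_lcmAndGcd (A : Int) (B : Int) : Prop := ¬ (A = 0 ∧ B ≤ 0)
instance (A : Int) (B : Int) : Decidable (Pre_lcmAndGcd A B) := by unfold Pre_lcmAndGcd; infer_instance
def pvWitness_lcmAndGcd : Int × Int := (12, 18)

def Spec_lcmAndGcd (A : Int) (B : Int) (out : Int × Int) : Prop := out = lcmAndGcd_alt A B
instance (A : Int) (B : Int) (out : Int × Int) : Decidable (Spec_lcmAndGcd A B out) := by unfold Spec_lcmAndGcd; infer_instance

-- ===== CLAIM (what is proved, stated in full; the proofs are below) =====
def Claim_equal_lcmAndGcd : Prop := ∀ (A : Int) (B : Int), Dom_lcmAndGcd A B → Pre_lcmAndGcd A B → Spec_lcmAndGcd A B (lcmAndGcd A B)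

-- ===== LEMMAS AND PROOFS =====

-- gcd is invariant under the Euclidean step (emod form)
lemma gcd_emod_step (a b : Int) : Int.gcd b (a % b) = Int.gcd a b := by
  have := Int.gcd_sub_mul_right_right b a (a / b)
  rw [show a - a / b * b = a % b by rw [Int.emod_def]; ring] at this
  rw [this, Int.gcd_comm]

-- stripping a factor 2 from one side against an odd other side
lemma gcd_two_mul_left_of_odd (a b : Int) (h : ¬ (2:Int) ∣ b) :
    Int.gcd (2 * a) b = Int.gcd a b := by
  rw [Int.gcd, Int.gcd, Int.natAbs_mul]
  have h2 : Nat.Coprime 2 b.natAbs :=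
    (Nat.Prime.coprime_iff_not_dvd Nat.prime_two).mpr
      (fun hd => h (Int.natAbs_dvd_natAbs.mp (by simpa using hd)))
  exact h2.gcd_mul_left_cancel a.natAbs

lemma gcd_two_mul_two_mul (a b : Int) : Int.gcd (2 * a) (2 * b) = 2 * Int.gcd a b := by
  simp [Int.gcd, Int.natAbs_mul, Nat.gcd_mul_left]

-- A's loop computes the (nonnegative) gcd whenever B > 0
lemma loopA_eq_gcd : ∀ (n : Nat) (a b : Int), 0 < b → b.toNat ≤ n →
    lcmAndGcdLoopA a b = (Int.gcd a b : Int) := by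
  intro n
  induction n with
  | zero => intro a b hb hn; omega
  | succ n ih =>
    intro a b hb hn
    rw [lcmAndGcdLoopA, dif_pos hb, PySem.Int.mod_eq_emod_of_pos hb]
    by_cases hm : a % b = 0
    · rw [hm, lcmAndGcdLoopA, dif_neg (by omega : ¬ (0:Int) > 0)]
      rw [← gcd_emod_step a b, hm]
      simp [Int.gcd, Int.natAbs_of_nonneg (le_of_lt hb)]
    · have h0 : 0 < a % b := lt_of_le_of_ne (Int.emod_nonneg a (ne_of_gt hb)) (Ne.symm hm)
      have hlt : a % b < b := Int.emod_lt_of_pos a hb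
      rw [ih b (a % b) h0 (by omega), gcd_emod_step a b]

-- B's Stein recursion computes the gcd on nonnegative arguments with sufficient fuel
lemma steinFuel_eq_gcd : ∀ (n : Nat) (a b : Int), 0 ≤ a → 0 ≤ b → a.toNat + b.toNat < n →
    steinFuel n a b = (Int.gcd a b : Int) := by
  intro n
  induction n with
  | zero => intro a b _ _ hn; omega
  | succ n ih =>
    intro a b ha hb hn
    rw [steinFuel]
    by_cases ha0 : a = 0
    · rw [if_pos ha0, ha0]
      simp [Int.gcd, Int.natAbs_of_nonneg hb]
    rw [if_neg ha0]
    by_cases hb0 : b = 0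
    · rw [if_pos hb0, hb0]
      simp [Int.gcd, Int.natAbs_of_nonneg ha]
    rw [if_neg hb0]
    have hda : PySem.Int.mod a 2 = 0 ↔ (2:Int) ∣ a := PySem.Int.mod_eq_zero_iff_dvd a 2
    have hdb : PySem.Int.mod b 2 = 0 ↔ (2:Int) ∣ b := PySem.Int.mod_eq_zero_iff_dvd b 2
    have hfa : PySem.Int.floordiv a 2 = a / 2 := PySem.Int.floordiv_eq_ediv_of_pos (by norm_num)
    have hfb : PySem.Int.floordiv b 2 = b / 2 := PySem.Int.floordiv_eq_ediv_of_pos (by norm_num)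
    by_cases hae : (2:Int) ∣ a
    · by_cases hbe : (2:Int) ∣ b
      · rw [if_pos ⟨hda.mpr hae, hdb.mpr hbe⟩, hfa, hfb]
        rw [ih (a/2) (b/2) (by omega) (by omega) (by omega)]
        rw [show Int.gcd a b = 2 * Int.gcd (a/2) (b/2) by
          conv_lhs => rw [show a = 2 * (a/2) by omega, show b = 2 * (b/2) by omega]
          exact gcd_two_mul_two_mul _ _]
        push_cast; ring
      · rw [if_neg (by rw [hdb]; tauto), if_pos (hda.mpr hae), hfa]
        rw [ih (a/2) b (by omega) hb (by omega)]
        rw [show Int.gcd a b = Int.gcd (a/2) b by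
          conv_lhs => rw [show a = 2 * (a/2) by omega]
          exact gcd_two_mul_left_of_odd _ _ hbe]
    · rw [if_neg (by rw [hda]; tauto), if_neg (by rw [hda]; tauto)]
      by_cases hbe : (2:Int) ∣ b
      · rw [if_pos (hdb.mpr hbe), hfb]
        rw [ih a (b/2) ha (by omega) (by omega)]
        rw [show Int.gcd a b = Int.gcd a (b/2) by
          rw [Int.gcd_comm, Int.gcd_comm a]
          conv_lhs => rw [show b = 2 * (b/2) by omega]
          exact gcd_two_mul_left_of_odd _ _ hae]
      · rw [if_neg (by rw [hdb]; tauto)]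
        have hsub : ∀ x y : Int, ¬ (2:Int) ∣ x → ¬ (2:Int) ∣ y →
            Int.gcd ((x - y) / 2) y = Int.gcd x y := by
          intro x y hx hy
          have h2 : (2:Int) ∣ (x - y) := by omega
          rw [show Int.gcd x y = Int.gcd (x - y) y from (Int.gcd_sub_self_left y x).symm]
          conv_rhs => rw [show x - y = 2 * ((x - y) / 2) by omega]
          exact (gcd_two_mul_left_of_odd _ _ hy).symm
        by_cases hge : a ≥ b
        · rw [if_pos hge, PySem.Int.floordiv_eq_ediv_of_pos (by norm_num)]
          rw [ih ((a-b)/2) b (by omega) hb (by omega)]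
          rw [hsub a b hae hbe]
        · rw [if_neg hge, PySem.Int.floordiv_eq_ediv_of_pos (by norm_num)]
          rw [ih a ((b-a)/2) ha (by omega) (by omega)]
          rw [show Int.gcd a ((b-a)/2) = Int.gcd ((b-a)/2) a from Int.gcd_comm _ _,
              hsub b a hbe hae, Int.gcd_comm]

-- ===== VERDICT (by name: the statement is the Claim_ definition above) =====
theorem lcmAndGcd_spec : Claim_equal_lcmAndGcd := by
  intro A B _hdom _hpre
  unfold Spec_lcmAndGcd
  show lcmAndGcd A B = lcmAndGcd_alt A B
  simp only [lcmAndGcd, lcmAndGcd_alt]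
  by_cases hB : B > 0
  · have hA := loopA_eq_gcd B.toNat A B hB (le_refl _)
    have hm0 : 0 ≤ PySem.Int.mod A B := PySem.Int.mod_nonneg A hB
    have hBalt := steinFuel_eq_gcd ((PySem.Int.mod A B).toNat + B.toNat + 1)
      (PySem.Int.mod A B) B hm0 (le_of_lt hB) (by omega)
    have hg : Int.gcd (PySem.Int.mod A B) B = Int.gcd A B := by
      rw [PySem.Int.mod_eq_emod_of_pos hB, Int.gcd_comm, gcd_emod_step]
    rw [hg] at hBalt
    rw [if_pos hB, hA, hBalt]
  · rw [if_neg hB, lcmAndGcdLoopA, dif_neg hB]
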